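-- pv_equiv track=rewrite | github.com/ahsanrazakhan83/Site-Audit-Dashboard | audit_tool_v4.py | create_sector_df
-- ===== SOURCE A (Python) =====
-- def create_sector_df(tech, az, tilt, antennas):
--     rows = []
--     max_len = max(len(az), len(tilt), len(antennas))
--     for i in range(max_len):
--         rows.append({
--             "Technology": tech,
--             "Sector": chr(65 + i),
--             "Azimuth": az[i] if i < len(az) else "",
--             "Tilt": tilt[i] if i < len(tilt) else "",
--             "Antenna Type": antennas[i] if i < len(antennas) else ""
--         })
--     return rows
-- ===== SOURCE B (Python) =====
-- def create_sector_df(tech, az, tilt, antennas):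
--     rows = []
--     its = (iter(az), iter(tilt), iter(antennas))
--     i = 0
--     while True:
--         a, t, an = (next(it, None) for it in its)
--         if a is None and t is None and an is None:
--             return rows
--         rows.append({
--             "Technology": tech,
--             "Sector": chr(65 + i),
--             "Azimuth": a if a is not None else "",
--             "Tilt": t if t is not None else "",
--             "Antenna Type": an if an is not None else ""
--         })
--         i += 1
-- ===== Notes on version B (the rewrite author's own statement) =====
-- stated objective: alternative
-- what changed: Replaces the index loop over range(max(len,...)) with a hand-rolled zip-longest: a loop consuming the three sequences element by element until all are exhausted, so max_len and the three i<len(...) guards disappear.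
import Mathlib
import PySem

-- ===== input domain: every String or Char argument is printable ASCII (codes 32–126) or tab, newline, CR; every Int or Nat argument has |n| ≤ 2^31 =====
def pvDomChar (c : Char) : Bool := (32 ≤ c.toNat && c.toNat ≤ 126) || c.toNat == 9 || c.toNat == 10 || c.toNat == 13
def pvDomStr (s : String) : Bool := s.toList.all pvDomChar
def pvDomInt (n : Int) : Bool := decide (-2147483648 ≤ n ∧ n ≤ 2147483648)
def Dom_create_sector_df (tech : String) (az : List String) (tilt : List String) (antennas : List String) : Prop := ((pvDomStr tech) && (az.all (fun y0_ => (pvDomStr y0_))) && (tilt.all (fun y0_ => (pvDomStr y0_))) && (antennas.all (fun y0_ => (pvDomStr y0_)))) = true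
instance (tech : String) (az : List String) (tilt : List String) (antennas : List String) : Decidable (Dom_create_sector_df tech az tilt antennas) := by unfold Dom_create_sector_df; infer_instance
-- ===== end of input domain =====

-- B replaces A's index loop over range(max(lens)) with structural recursion consuming the three
-- lists head/tail until all are exhausted (objective: alternative decomposition, same cost).

-- ===== PORT A =====
def create_sector_df (tech : String) (az : List String) (tilt : List String) (antennas : List String) : List (List (String × String)) :=
  let max_len : Nat := max (max az.length tilt.length) antennas.length
  (PySem.List.pyRange 0 (max_len : Int) 1).foldl
    (fun rows i => rows ++
      [[("Technology", tech),
        ("Sector", String.mk [Char.ofNat (65 + i).toNat]),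
        ("Azimuth", if i < (az.length : Int) then PySem.List.pyGetD az i "" else ""),
        ("Tilt", if i < (tilt.length : Int) then PySem.List.pyGetD tilt i "" else ""),
        ("Antenna Type", if i < (antennas.length : Int) then PySem.List.pyGetD antennas i "" else "")]])
    []

-- ===== PORT B =====
-- the while-loop of Source B: state = (rows so far, i, the three iterators' remaining elements);
-- next(it, None) = head? (None ↔ the remaining list is empty), advancing = tail
def altRows (tech : String) (rows : List (List (String × String))) (i : Nat) (a t an : List String) : List (List (String × String)) :=
  if a = [] ∧ t = [] ∧ an = [] then rows
  else
    altRows tech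
      (rows ++
        [[("Technology", tech),
          ("Sector", String.mk [Char.ofNat (65 + i)]),
          ("Azimuth", a.headD ""),
          ("Tilt", t.headD ""),
          ("Antenna Type", an.headD "")]])
      (i + 1) a.tail t.tail an.tail
termination_by a.length + t.length + an.length
decreasing_by cases a <;> cases t <;> cases an <;> simp_all [List.length_tail] <;> omega

def create_sector_df_alt (tech : String) (az : List String) (tilt : List String) (antennas : List String) : List (List (String × String)) :=
  altRows tech [] 0 az tilt antennas

-- ===== PRECONDITION & SPEC =====
def Spec_create_sector_df (tech : String) (az : List String) (tilt : List String) (antennas : List String) (out : List (List (String × String))) : Prop := out = create_sector_df_alt tech az tilt antennas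
instance (tech : String) (az : List String) (tilt : List String) (antennas : List String) (out : List (List (String × String))) : Decidable (Spec_create_sector_df tech az tilt antennas out) := by unfold Spec_create_sector_df; infer_instance

-- ===== CLAIM (what is proved, stated in full; the proofs are below) =====
def Claim_equal_create_sector_df : Prop := ∀ (tech : String) (az : List String) (tilt : List String) (antennas : List String), Dom_create_sector_df tech az tilt antennas → Spec_create_sector_df tech az tilt antennas (create_sector_df tech az tilt antennas)

-- ===== LEMMAS AND PROOFS =====

-- one abstract row shape both sides are rewritten to (s = sector index, k = lookup index)
def rowOf (tech : String) (s k : Nat) (a t an : List String) : List (String × String) :=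
  [("Technology", tech),
   ("Sector", String.mk [Char.ofNat (65 + s)]),
   ("Azimuth", a.getD k ""),
   ("Tilt", t.getD k ""),
   ("Antenna Type", an.getD k "")]

lemma getD_tail (a : List String) (k : Nat) : a.tail.getD k "" = a.getD (k + 1) "" := by
  cases a <;> simp [List.getD]

lemma alt_eq (tech : String) : ∀ (n : Nat) (a t an : List String) (rows : List (List (String × String))) (i : Nat),
    n = max (max a.length t.length) an.length →
    altRows tech rows i a t an
      = rows ++ (List.range n).map (fun k => rowOf tech (i + k) k a t an) := by
  intro n
  induction n with
  | zero =>
    intro a t an rows i h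
    have ha : a = [] := by cases a <;> simp_all <;> omega
    have ht : t = [] := by cases t <;> simp_all <;> omega
    have han : an = [] := by cases an <;> simp_all <;> omega
    subst ha ht han
    rw [altRows]; simp
  | succ m ih =>
    intro a t an rows i h
    have hne : ¬ (a = [] ∧ t = [] ∧ an = []) := by
      rintro ⟨ha, ht, han⟩; subst ha ht han; simp at h
    rw [altRows, if_neg hne]
    have hm : m = max (max a.tail.length t.tail.length) an.tail.length := by
      simp only [List.length_tail]; omega
    rw [ih a.tail t.tail an.tail _ (i + 1) hm]
    rw [List.range_succ_eq_map]
    simp only [List.map_cons, List.map_map, List.append_assoc, List.singleton_append]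
    refine congrArg _ (congrArg₂ _ ?_ ?_)
    · cases a <;> cases t <;> cases an <;> simp [rowOf, List.getD]
    · apply List.map_congr_left
      intro k _
      simp only [Function.comp_apply, rowOf, getD_tail]
      have : i + 1 + k = i + (k + 1) := by omega
      rw [this]

lemma a_eq (tech : String) (az tilt antennas : List String) :
    create_sector_df tech az tilt antennas
      = (List.range (max (max az.length tilt.length) antennas.length)).map
          (fun k => rowOf tech k k az tilt antennas) := by
  unfold create_sector_df
  rw [PySem.List.foldl_append_singleton_eq_map, PySem.List.pyRange_one]
  simp only [Int.sub_zero, Int.toNat_natCast, List.map_map, List.nil_append]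
  apply List.map_congr_left
  intro k _
  simp only [Function.comp_apply, rowOf, Int.zero_add]
  have hc : ((65 : Int) + (k : Int)).toNat = 65 + k := by omega
  refine congrArg₂ _ rfl (congrArg₂ _ (by rw [hc]) ?_)
  refine congrArg₂ _ ?_ (congrArg₂ _ ?_ (congrArg₂ _ ?_ rfl)) <;>
  · congr 1
    split_ifs with hlt
    · rw [PySem.List.pyGetD_natCast]
    · rw [List.getD_eq_getElem?_getD, List.getElem?_eq_none (by exact_mod_cast Int.not_lt.mp hlt)]
      rfl

-- ===== VERDICT (by name: the statement is the Claim_ definition above) =====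
theorem create_sector_df_spec : Claim_equal_create_sector_df := by
  intro tech az tilt antennas _
  unfold Spec_create_sector_df create_sector_df_alt
  rw [a_eq, alt_eq tech _ az tilt antennas [] 0 rfl]
  simp
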